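-- pv_equiv track=rewrite | github.com/seanbarlisan/Neetcode-Practice | findDuplicateNumbers.py | duplicateNumbers
-- ===== SOURCE A (Python) =====
-- def duplicateNumbers(nums):
--     seen = set()
--     n = 0
--     for x in nums:
--         if x in seen:
--             n = x
--         else:
--             seen.add(x)
--
--     return n
-- ===== SOURCE B (Python) =====
-- def duplicateNumbers(nums):
--     counts = {}
--     for x in nums:
--         counts[x] = counts.get(x, 0) + 1
--     for x in reversed(nums):
--         if counts[x] > 1:
--             return x
--     return 0
-- ===== Notes on version B (the rewrite author's own statement) =====
-- stated objective: alternative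
-- what changed: Replaces A's single forward pass that grows a seen-set and overwrites the result on each repeat with a frequency-table build followed by a reverse scan returning the first value with count > 1.
import Mathlib
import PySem

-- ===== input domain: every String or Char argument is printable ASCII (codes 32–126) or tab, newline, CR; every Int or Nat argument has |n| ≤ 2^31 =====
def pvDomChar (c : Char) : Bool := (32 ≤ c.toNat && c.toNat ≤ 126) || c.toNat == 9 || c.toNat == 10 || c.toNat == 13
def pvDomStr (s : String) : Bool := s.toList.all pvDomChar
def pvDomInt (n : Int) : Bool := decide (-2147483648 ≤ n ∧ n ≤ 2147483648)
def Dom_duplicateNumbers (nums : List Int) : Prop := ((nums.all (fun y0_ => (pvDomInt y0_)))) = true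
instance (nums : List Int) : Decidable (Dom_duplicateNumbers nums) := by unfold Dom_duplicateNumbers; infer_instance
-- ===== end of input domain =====

-- B: frequency table + reverse scan instead of A's forward seen-set pass; alternative decomposition, same cost.

-- ===== PORT A =====
-- for x in nums: if x in seen: n = x else: seen.add(x); return n
def duplicateNumbers (nums : List Int) : Int :=
  (nums.foldl
    (fun (st : PySem.Set Int × Int) x =>
      if PySem.Set.contains st.1 x then (st.1, x) else (PySem.Set.add st.1 x, st.2))
    (PySem.Set.empty, 0)).2

-- ===== PORT B =====
-- for x in reversed(nums): if counts[x] > 1: return x;  return 0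
def findDupRev (counts : PySem.Dict Int Int) : List Int → Int
  | [] => 0
  | x :: rest => if counts.getD x 0 > 1 then x else findDupRev counts rest

-- counts[x] = counts.get(x, 0) + 1 built over nums, then the reverse scan
def duplicateNumbers_alt (nums : List Int) : Int :=
  findDupRev (nums.foldl (fun d x => d.insert x (d.getD x 0 + 1)) PySem.Dict.empty) nums.reverse

-- ===== PRECONDITION & SPEC =====
def Spec_duplicateNumbers (nums : List Int) (out : Int) : Prop := out = duplicateNumbers_alt nums
instance (nums : List Int) (out : Int) : Decidable (Spec_duplicateNumbers nums out) := by unfold Spec_duplicateNumbers; infer_instance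

-- ===== CLAIM (what is proved, stated in full; the proofs are below) =====
def Claim_equal_duplicateNumbers : Prop := ∀ (nums : List Int), Dom_duplicateNumbers nums → Spec_duplicateNumbers nums (duplicateNumbers nums)

-- ===== LEMMAS AND PROOFS =====

-- A's fold, with arbitrary initial state, for the induction
def foldA (init : PySem.Set Int × Int) (xs : List Int) : PySem.Set Int × Int :=
  xs.foldl
    (fun (st : PySem.Set Int × Int) x =>
      if PySem.Set.contains st.1 x then (st.1, x) else (PySem.Set.add st.1 x, st.2))
    init

theorem duplicateNumbers_eq_foldA (nums : List Int) :
    duplicateNumbers nums = (foldA (PySem.Set.empty, 0) nums).2 := rfl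

theorem foldA_fst (xs : List Int) (seen : PySem.Set Int) (n : Int) :
    (foldA (seen, n) xs).1 = PySem.Set.update seen xs := by
  induction xs generalizing seen n with
  | nil => rfl
  | cons x rest ih =>
    simp only [foldA, List.foldl_cons] at ih ⊢
    by_cases h : PySem.Set.contains seen x = true
    · rw [if_pos h, ih]
      simp only [PySem.Set.contains_iff] at h
      have hadd : PySem.Set.add seen x = seen := by
        simp [PySem.Set.add, h]
      simp [PySem.Set.update, hadd]
    · rw [if_neg h, ih]
      simp [PySem.Set.update]

theorem foldA_append (xs : List Int) (x : Int) (init : PySem.Set Int × Int) :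
    foldA init (xs ++ [x]) =
      (fun (st : PySem.Set Int × Int) y =>
        if PySem.Set.contains st.1 y then (st.1, y) else (PySem.Set.add st.1 y, st.2))
        (foldA init xs) x := by
  simp [foldA]

-- B's counter lookup is list count
theorem counts_getD (nums : List Int) (v : Int) :
    (nums.foldl (fun d x => d.insert x (d.getD x 0 + 1)) PySem.Dict.empty).getD v 0
      = (nums.count v : Int) := by
  rw [PySem.Dict.foldl_insert_getD_add_one_eq_counter]
  exact PySem.Dict.getD_counter nums v

-- if the count-predicate agrees on every scanned element, findDupRev agrees
theorem findDupRev_congr (c₁ c₂ : PySem.Dict Int Int) (ms : List Int)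
    (h : ∀ x ∈ ms, (c₁.getD x 0 > 1 ↔ c₂.getD x 0 > 1)) :
    findDupRev c₁ ms = findDupRev c₂ ms := by
  induction ms with
  | nil => rfl
  | cons x rest ih =>
    have hx := h x (by simp)
    by_cases h1 : c₁.getD x 0 > 1
    · simp [findDupRev, h1, hx.mp h1]
    · have h2 : ¬ c₂.getD x 0 > 1 := fun h2 => h1 (hx.mpr h2)
      simp [findDupRev, h1, h2]
      exact ih (fun y hy => h y (by simp [hy]))

theorem main_eq (nums : List Int) : duplicateNumbers nums = duplicateNumbers_alt nums := by
  induction nums using List.reverseRecOn with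
  | nil => rfl
  | append_singleton xs x ih =>
    rw [duplicateNumbers_eq_foldA, foldA_append]
    beta_reduce
    have hfst : (foldA (PySem.Set.empty, 0) xs).1 = PySem.Set.ofList xs := by
      rw [foldA_fst]; exact PySem.Set.update_nil_left xs
    have halt : duplicateNumbers_alt (xs ++ [x])
        = findDupRev (((xs ++ [x]).foldl (fun d y => d.insert y (d.getD y 0 + 1)) PySem.Dict.empty : PySem.Dict Int Int))
            (x :: xs.reverse) := by
      simp [duplicateNumbers_alt]
    set cnts : PySem.Dict Int Int := (xs ++ [x]).foldl (fun d y => d.insert y (d.getD y 0 + 1)) PySem.Dict.empty with hc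
    by_cases hmem : x ∈ xs
    · have hcontains : PySem.Set.contains (foldA (PySem.Set.empty, 0) xs).1 x = true := by
        rw [hfst]; simp [PySem.Set.mem_ofList, hmem]
      have hcx : cnts.getD x 0 > 1 := by
        rw [hc, counts_getD]
        have h1 : 1 ≤ xs.count x := List.one_le_count_iff.mpr hmem
        have h2 : 2 ≤ (xs ++ [x]).count x := by
          rw [List.count_append, List.count_singleton]
          simp
          omega
        exact_mod_cast h2
      rw [if_pos hcontains, halt]
      show x = if cnts.getD x 0 > 1 then x else findDupRev cnts xs.reverse
      rw [if_pos hcx]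
    · have hcontains : ¬ PySem.Set.contains (foldA (PySem.Set.empty, 0) xs).1 x = true := by
        rw [hfst]; simp [PySem.Set.mem_ofList, hmem]
      have hcx : ¬ cnts.getD x 0 > 1 := by
        rw [hc, counts_getD, List.count_append]
        have h0 : xs.count x = 0 := List.count_eq_zero.mpr hmem
        rw [h0]
        simp
      rw [if_neg hcontains]
      show (foldA (PySem.Set.empty, 0) xs).2 = _
      rw [← duplicateNumbers_eq_foldA, ih, halt]
      show duplicateNumbers_alt xs = if cnts.getD x 0 > 1 then x else findDupRev cnts xs.reverse
      rw [if_neg hcx]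
      exact findDupRev_congr _ _ _ (fun v hv => by
        have hvx : v ≠ x := fun he => hmem (by rw [← he]; exact List.mem_reverse.mp hv)
        rw [counts_getD, hc, counts_getD]
        have hcount : (xs ++ [x]).count v = xs.count v := by
          rw [List.count_append, List.count_singleton]
          simp [Ne.symm hvx]
        rw [hcount])

-- ===== VERDICT (by name: the statement is the Claim_ definition above) =====
theorem duplicateNumbers_spec : Claim_equal_duplicateNumbers := by
  intro nums _
  exact main_eq nums
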